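-- pv_equiv track=rewrite | github.com/fatofato24/Handwritten-Text-recognition | handwritten-text-recognition/src/utils.py | get_case_sensitivity_errors
-- ===== SOURCE A (Python) =====
-- def get_case_sensitivity_errors(predicted: str, ground_truth: str) -> int:
--     """
--     Count characters that differ only in case.
--
--     Args:
--         predicted: Predicted text
--         ground_truth: Ground truth text
--
--     Returns:
--         Number of case-only mismatches
--     """
--     if len(predicted) != len(ground_truth):
--         return 0
--
--     count = 0
--     for p, g in zip(predicted, ground_truth):
--         if p.lower() == g.lower() and p != g:
--             count += 1
--
--     return count
-- ===== SOURCE B (Python) =====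
-- def get_case_sensitivity_errors(predicted: str, ground_truth: str) -> int:
--     """Count characters that differ only in case.
--
--     Different decomposition: case-only mismatches = case-insensitive
--     matches minus exact matches.
--     """
--     if len(predicted) != len(ground_truth):
--         return 0
--     pairs = list(zip(predicted, ground_truth))
--     ci_matches = sum(p.lower() == g.lower() for p, g in pairs)
--     exact_matches = sum(p == g for p, g in pairs)
--     return ci_matches - exact_matches
-- ===== Notes on version B (the rewrite author's own statement) =====
-- stated objective: alternative
-- what changed: Replaces the single loop testing the conjunction (case-insensitive match and not exact match) per character by two aggregate counts over the zipped characters, returning case-insensitive matches minus exact matches; correctness rests on exact match implying case-insensitive match.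
import Mathlib
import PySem

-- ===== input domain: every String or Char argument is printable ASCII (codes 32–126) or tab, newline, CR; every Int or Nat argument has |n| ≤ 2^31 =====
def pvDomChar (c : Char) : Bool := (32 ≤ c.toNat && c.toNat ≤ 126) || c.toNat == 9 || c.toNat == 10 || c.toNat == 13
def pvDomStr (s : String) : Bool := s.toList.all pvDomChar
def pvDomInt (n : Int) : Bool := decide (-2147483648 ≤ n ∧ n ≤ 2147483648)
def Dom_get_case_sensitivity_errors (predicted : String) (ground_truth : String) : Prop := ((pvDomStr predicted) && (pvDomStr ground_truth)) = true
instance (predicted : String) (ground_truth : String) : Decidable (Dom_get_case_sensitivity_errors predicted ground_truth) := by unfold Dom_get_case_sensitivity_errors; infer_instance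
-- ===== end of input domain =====

-- B replaces A's per-character conjunction loop by two aggregate counts
-- (case-insensitive matches minus exact matches); alternative decomposition, same cost.

-- ===== PORT A =====
def get_case_sensitivity_errors (predicted : String) (ground_truth : String) : Int :=
  if PySem.Str.len predicted ≠ PySem.Str.len ground_truth then 0
  else
    (predicted.toList.zip ground_truth.toList).foldl
      (fun count pg =>
        if PySem.Chars.lowerChar pg.1 == PySem.Chars.lowerChar pg.2 && pg.1 != pg.2
        then count + 1 else count) 0

-- ===== PORT B =====
def get_case_sensitivity_errors_alt (predicted : String) (ground_truth : String) : Int :=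
  if PySem.Str.len predicted ≠ PySem.Str.len ground_truth then 0
  else
    let pairs := predicted.toList.zip ground_truth.toList
    let ci_matches : Int :=
      (pairs.map (fun pg => if PySem.Chars.lowerChar pg.1 == PySem.Chars.lowerChar pg.2 then (1 : Int) else 0)).sum
    let exact_matches : Int :=
      (pairs.map (fun pg => if pg.1 == pg.2 then (1 : Int) else 0)).sum
    ci_matches - exact_matches

-- ===== PRECONDITION & SPEC =====
def Spec_get_case_sensitivity_errors (predicted : String) (ground_truth : String) (out : Int) : Prop := out = get_case_sensitivity_errors_alt predicted ground_truth
instance (predicted : String) (ground_truth : String) (out : Int) : Decidable (Spec_get_case_sensitivity_errors predicted ground_truth out) := by unfold Spec_get_case_sensitivity_errors; infer_instance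

-- ===== CLAIM (what is proved, stated in full; the proofs are below) =====
def Claim_equal_get_case_sensitivity_errors : Prop := ∀ (predicted : String) (ground_truth : String), Dom_get_case_sensitivity_errors predicted ground_truth → Spec_get_case_sensitivity_errors predicted ground_truth (get_case_sensitivity_errors predicted ground_truth)

-- ===== LEMMAS AND PROOFS =====

-- The core identity on the zipped list: A's conditional count equals
-- (# case-insensitive matches) − (# exact matches), since p == g implies
-- lowerChar p == lowerChar g.
theorem pv_core (l : List (Char × Char)) (acc : Int) :
    l.foldl (fun count pg =>
        if PySem.Chars.lowerChar pg.1 == PySem.Chars.lowerChar pg.2 && pg.1 != pg.2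
        then count + 1 else count) acc
    = acc
      + (l.map (fun pg => if PySem.Chars.lowerChar pg.1 == PySem.Chars.lowerChar pg.2 then (1 : Int) else 0)).sum
      - (l.map (fun pg => if pg.1 == pg.2 then (1 : Int) else 0)).sum := by
  induction l generalizing acc with
  | nil => simp
  | cons hd tl ih =>
    simp only [List.foldl_cons, List.map_cons, List.sum_cons, ih]
    by_cases he : hd.1 = hd.2
    · have h3 : (PySem.Chars.lowerChar hd.1 == PySem.Chars.lowerChar hd.2) = true := by simp [he]
      simp [he, h3]
      ring
    · have hne : (hd.1 != hd.2) = true := by simp [he]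
      by_cases hl : PySem.Chars.lowerChar hd.1 = PySem.Chars.lowerChar hd.2
      · simp only [hl, hne, beq_self_eq_true, Bool.true_and, if_true, beq_iff_eq, he, if_false]
        ring
      · simp [hl, he]

-- ===== VERDICT (by name: the statement is the Claim_ definition above) =====
theorem get_case_sensitivity_errors_spec : Claim_equal_get_case_sensitivity_errors := by
  intro p g _
  unfold Spec_get_case_sensitivity_errors get_case_sensitivity_errors get_case_sensitivity_errors_alt
  by_cases h : PySem.Str.len p = PySem.Str.len g
  · rw [if_neg (not_not_intro h), if_neg (not_not_intro h), pv_core]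
    ring
  · rw [if_pos h, if_pos h]
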